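-- pv_equiv track=rewrite | github.com/manaskatoch/SkillCraft-Technology | task3.py | sequential_chars_penalty
-- ===== SOURCE A (Python) =====
-- import string
--
-- def sequential_chars_penalty(pwd: str, seq_len: int = 3) -> int:
--     pwd_lower = pwd.lower()
--     alpha = string.ascii_lowercase
--     digits = string.digits
--     penalty = 0
--     for i in range(len(pwd_lower) - seq_len + 1):
--         seg = pwd_lower[i:i+seq_len]
--         if seg in alpha or seg[::-1] in alpha or seg in digits or seg[::-1] in digits:
--             penalty += 1
--     return penalty
-- ===== SOURCE B (Python) =====
-- def sequential_chars_penalty(pwd: str, seq_len: int = 3) -> int: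
--     # Single pass: track lengths of the current ascending and descending
--     # alphanumeric runs; a window of seq_len counts iff a run covers it.
--     penalty = 0
--     asc = desc = 0
--     prev = None
--     for c in pwd.lower():
--         alnum = ('a' <= c <= 'z') or ('0' <= c <= '9')
--         prev_alnum = prev is not None and (('a' <= prev <= 'z') or ('0' <= prev <= '9'))
--         if alnum and prev_alnum and ord(c) - ord(prev) == 1:
--             asc += 1
--         else:
--             asc = 1 if alnum else 0
--         if alnum and prev_alnum and ord(prev) - ord(c) == 1:
--             desc += 1
--         else:
--             desc = 1 if alnum else 0
--         if asc >= seq_len or desc >= seq_len: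
--             penalty += 1
--         prev = c
--     return penalty
-- ===== Notes on version B (the rewrite author's own statement) =====
-- stated objective: alternative
-- what changed: Replaces the per-window slice and substring search in the lowercase alphabet / digit strings by a single left-to-right pass that maintains the lengths of the current ascending and descending alphanumeric runs, counting a window whenever a run reaches seq_len.
-- outside the precondition, e.g. on sequential_chars_penalty('abc', 0): A returns 4, B returns 3; on sequential_chars_penalty('abc', -1): A returns 5, B returns 3
import Mathlib
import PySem

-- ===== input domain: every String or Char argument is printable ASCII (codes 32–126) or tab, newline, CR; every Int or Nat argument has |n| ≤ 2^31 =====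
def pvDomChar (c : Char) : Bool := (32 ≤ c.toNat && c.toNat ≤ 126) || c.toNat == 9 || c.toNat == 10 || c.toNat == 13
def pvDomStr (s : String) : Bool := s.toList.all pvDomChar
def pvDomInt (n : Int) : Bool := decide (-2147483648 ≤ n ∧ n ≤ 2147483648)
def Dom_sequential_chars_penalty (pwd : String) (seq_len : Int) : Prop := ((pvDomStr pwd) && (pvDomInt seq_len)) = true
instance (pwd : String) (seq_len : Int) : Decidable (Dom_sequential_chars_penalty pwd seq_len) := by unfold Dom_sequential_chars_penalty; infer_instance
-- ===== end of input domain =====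

-- B replaces the per-window slice + substring search with a single pass tracking
-- ascending/descending alphanumeric run lengths (alternative algorithm).

-- ===== PORT A =====
def sequential_chars_penalty (pwd : String) (seq_len : Int) : Int :=
  let pwd_lower : List Char := PySem.Chars.lower pwd.toList
  let alpha : List Char := "abcdefghijklmnopqrstuvwxyz".toList
  let digits : List Char := "0123456789".toList
  (PySem.List.pyRange 0 (PySem.Chars.len pwd_lower - seq_len + 1) 1).foldl
    (fun penalty i =>
      let seg := PySem.List.slice pwd_lower (some i) (some (i + seq_len))
      if PySem.Chars.isIn seg alpha
          || PySem.Chars.isIn ((PySem.List.slice? seg none none (-1)).getD []) alpha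
          || PySem.Chars.isIn seg digits
          || PySem.Chars.isIn ((PySem.List.slice? seg none none (-1)).getD []) digits
      then penalty + 1 else penalty) 0

-- ===== PORT B =====
def pvAlnum (c : Char) : Bool := ('a' ≤ c && c ≤ 'z') || ('0' ≤ c && c ≤ '9')

def pvStepUp (p c : Char) : Bool := pvAlnum p && pvAlnum c && (c.toNat == p.toNat + 1)

def pvStepB (seq_len : Int) (st : Int × Int × Int × Option Char) (c : Char) :
    Int × Int × Int × Option Char :=
  match st with
  | (penalty, asc, desc, prev) =>
    let prevUp : Bool := match prev with | some p => pvStepUp p c | none => false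
    let prevDown : Bool := match prev with | some p => pvStepUp c p | none => false
    let asc' := if prevUp then asc + 1 else if pvAlnum c then 1 else 0
    let desc' := if prevDown then desc + 1 else if pvAlnum c then 1 else 0
    let penalty' := if seq_len ≤ asc' ∨ seq_len ≤ desc' then penalty + 1 else penalty
    (penalty', asc', desc', some c)

def sequential_chars_penalty_alt (pwd : String) (seq_len : Int) : Int :=
  ((PySem.Chars.lower pwd.toList).foldl (pvStepB seq_len) (0, 0, 0, none)).1

-- ===== PRECONDITION & SPEC =====
-- Pre_ excludes non-positive seq_len, where A's count (every empty slice is a substring,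
-- and a negative slice end wraps to the string's end) is an artefact of Python slice
-- semantics that no natural window-counting implementation reproduces.
def Pre_sequential_chars_penalty (pwd : String) (seq_len : Int) : Prop := 1 ≤ seq_len
instance (pwd : String) (seq_len : Int) : Decidable (Pre_sequential_chars_penalty pwd seq_len) := by
  unfold Pre_sequential_chars_penalty; infer_instance

def pvWitness_sequential_chars_penalty : String × Int := ("xyz9 ba210", 3)

def Spec_sequential_chars_penalty (pwd : String) (seq_len : Int) (out : Int) : Prop :=
  out = sequential_chars_penalty_alt pwd seq_len
instance (pwd : String) (seq_len : Int) (out : Int) : Decidable (Spec_sequential_chars_penalty pwd seq_len out) := by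
  unfold Spec_sequential_chars_penalty; infer_instance

-- ===== CLAIM (what is proved, stated in full; the proofs are below) =====
def Claim_equal_sequential_chars_penalty : Prop := ∀ (pwd : String) (seq_len : Int), Dom_sequential_chars_penalty pwd seq_len → Pre_sequential_chars_penalty pwd seq_len → Spec_sequential_chars_penalty pwd seq_len (sequential_chars_penalty pwd seq_len)

-- ===== LEMMAS AND PROOFS =====

def pvRunSt (stp : Char → Char → Bool) (st : Nat × Option Char) (c : Char) : Nat × Option Char :=
  ((if (match st.2 with | some p => stp p c | none => false) then st.1 + 1
    else if pvAlnum c then 1 else 0), some c)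
def pvRun (stp : Char → Char → Bool) (p : List Char) : Nat := (p.foldl (pvRunSt stp) (0, none)).1
def pvG (stp : Char → Char → Bool) (t : List Char) : Prop :=
  t.IsChain (fun a b => stp a b = true) ∧ ∀ c ∈ t, pvAlnum c = true
lemma pvRun_state (stp : Char → Char → Bool) (p : List Char) :
    p.foldl (pvRunSt stp) (0, none) = (pvRun stp p, p.getLast?) := by
  refine Prod.ext rfl ?_
  induction p using List.reverseRecOn with
  | nil => rfl
  | append_singleton p c ih => rw [List.foldl_append, List.getLast?_concat]; rfl
lemma pvRun_concat (stp : Char → Char → Bool) (p : List Char) (c : Char) :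
    pvRun stp (p ++ [c]) =
      if (match p.getLast? with | some a => stp a c | none => false) then pvRun stp p + 1
      else if pvAlnum c then 1 else 0 := by
  have : pvRun stp (p ++ [c]) = (pvRunSt stp (p.foldl (pvRunSt stp) (0, none)) c).1 := by
    rw [pvRun, List.foldl_append]; rfl
  rw [this, pvRun_state]; rfl

lemma pvRun_le (stp : Char → Char → Bool) (p : List Char) : pvRun stp p ≤ p.length := by
  induction p using List.reverseRecOn with
  | nil => exact Nat.le_refl 0
  | append_singleton p c ih =>
      rw [pvRun_concat, List.length_append, List.length_singleton]
      split <;> (try split) <;> (try split) <;>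
        first
          | exact Nat.add_le_add_right ih 1
          | exact Nat.succ_le_succ (Nat.zero_le _)
          | exact Nat.zero_le _

lemma pvG_concat (stp : Char → Char → Bool) (w : List Char) (c : Char) :
    pvG stp (w ++ [c]) ↔
      pvG stp w ∧ pvAlnum c = true ∧ (∀ a, w.getLast? = some a → stp a c = true) := by
  simp only [pvG, List.isChain_append, List.mem_append, List.mem_singleton]
  constructor
  · rintro ⟨⟨h1, -, h3⟩, h4⟩
    exact ⟨⟨h1, fun x hx => h4 x (Or.inl hx)⟩, h4 c (Or.inr rfl),
      fun a ha => h3 a ha c (by simp)⟩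
  · rintro ⟨⟨h1, h2⟩, hc, h3⟩
    refine ⟨⟨h1, by simp, ?_⟩, ?_⟩
    · intro x hx y hy
      simp only [List.head?_cons, Option.mem_def, Option.some.injEq] at hy
      subst hy; exact h3 x hx
    · rintro x (hx | rfl)
      · exact h2 x hx
      · exact hc

lemma pvRun_ge_iff (stp : Char → Char → Bool)
    (hstp : ∀ a b, stp a b = true → pvAlnum a = true ∧ pvAlnum b = true)
    (p : List Char) : ∀ (L : Nat), 1 ≤ L →
    (L ≤ pvRun stp p ↔ L ≤ p.length ∧ pvG stp (p.drop (p.length - L))) := by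
  induction p using List.reverseRecOn with
  | nil =>
      intro L hL
      simp only [pvRun, List.foldl_nil, List.length_nil, List.drop_nil]
      constructor
      · intro h; omega
      · rintro ⟨h, -⟩; omega
  | append_singleton p c ih =>
      intro L hL
      rw [pvRun_concat, List.length_append, List.length_singleton]
      have hk' : p.length + 1 - L ≤ p.length := by omega
      rw [List.drop_append_of_le_length hk', pvG_concat]
      rcases hlast : p.getLast? with _ | a
      · -- p = []
        rw [List.getLast?_eq_none_iff] at hlast
        subst hlast
        rw [if_neg (by simp)]
        simp only [List.length_nil, List.drop_nil, Nat.zero_add]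
        by_cases hc : pvAlnum c = true
        · rw [if_pos hc]
          constructor
          · intro h
            refine ⟨by omega, ⟨by simp, by simp⟩, hc, by simp⟩
          · rintro ⟨h1, -⟩; omega
        · rw [if_neg hc]
          constructor
          · intro h; omega
          · rintro ⟨-, -, hcal, -⟩; exact absurd hcal hc
      · -- p ≠ []
        have hplen : 1 ≤ p.length := by
          rcases p with _ | ⟨x, xs⟩
          · simp at hlast
          · simp
        by_cases hst : stp a c = true
        · rw [if_pos hst]
          by_cases hL1 : L = 1
          · subst hL1
            have hdrop : p.drop (p.length + 1 - 1) = [] := by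
              rw [Nat.add_sub_cancel, List.drop_length]
            rw [hdrop]
            constructor
            · intro _
              exact ⟨by omega, ⟨by simp, by simp⟩, (hstp a c hst).2, by simp⟩
            · intro _; omega
          · have hL2 : 2 ≤ L := by omega
            have hlast' : (p.drop (p.length + 1 - L)).getLast? = some a := by
              rw [List.getLast?_drop, if_neg (by omega)]; exact hlast
            have hiff := ih (L - 1) (by omega)
            have hdropeq : p.length - (L - 1) = p.length + 1 - L := by omega
            rw [hdropeq] at hiff
            generalize hr : pvRun stp p = r at hiff ⊢
            constructor
            · intro h
              have h2 := hiff.mp (by omega)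
              refine ⟨by omega, h2.2, (hstp a c hst).2, ?_⟩
              intro b hb
              rw [hlast'] at hb
              injection hb with hb
              subst hb
              exact hst
            · rintro ⟨hlen2, hG, -, -⟩
              have := hiff.mpr ⟨by omega, hG⟩
              omega
        · rw [if_neg hst]
          by_cases hc : pvAlnum c = true
          · rw [if_pos hc]
            constructor
            · intro h
              have hL1 : L = 1 := by omega
              subst hL1
              have hdrop : p.drop (p.length + 1 - 1) = [] := by
                rw [Nat.add_sub_cancel, List.drop_length]
              rw [hdrop]
              exact ⟨by omega, ⟨by simp, by simp⟩, hc, by simp⟩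
            · rintro ⟨hlen2, hG, -, hlastcond⟩
              by_cases hL1 : L = 1
              · omega
              · exfalso
                have hlast' : (p.drop (p.length + 1 - L)).getLast? = some a := by
                  rw [List.getLast?_drop, if_neg (by omega)]; exact hlast
                exact hst (hlastcond a hlast')
          · rw [if_neg hc]
            constructor
            · intro h; omega
            · rintro ⟨-, -, hcal, -⟩; exact absurd hcal hc

def pvStepDown (a b : Char) : Bool := pvStepUp b a
def pvCnt (L : Int) (p : List Char) : Nat :=
  (List.range p.length).countP (fun j =>
    decide (L ≤ (pvRun pvStepUp (p.take (j+1)) : Int) ∨ L ≤ (pvRun pvStepDown (p.take (j+1)) : Int)))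

lemma pvCastIte (b : Bool) (r : Nat) (c : Char) :
    (if b then (r : Int) + 1 else if pvAlnum c then 1 else 0) =
      ((if b then r + 1 else if pvAlnum c then 1 else 0 : Nat) : Int) := by
  split
  · push_cast; ring
  · split <;> simp

lemma pvCnt_concat (L : Int) (p : List Char) (c : Char) :
    pvCnt L (p ++ [c]) = pvCnt L p +
      (if (L ≤ (pvRun pvStepUp (p ++ [c]) : Int) ∨ L ≤ (pvRun pvStepDown (p ++ [c]) : Int))
        then 1 else 0) := by
  unfold pvCnt
  rw [List.length_append, List.length_singleton, List.range_succ, List.countP_append]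
  congr 1
  · apply List.countP_congr
    intro j hj
    rw [List.mem_range] at hj
    rw [List.take_append_of_le_length (by omega)]
  · rw [List.countP_singleton, List.take_of_length_le (by simp)]
    split <;> rename_i h
    · rw [if_pos (by simpa using h)]
    · rw [if_neg (by simpa using h)]

lemma pvFoldB (L : Int) (p : List Char) :
    p.foldl (pvStepB L) (0, 0, 0, none) =
      ((pvCnt L p : Int), (pvRun pvStepUp p : Int), (pvRun pvStepDown p : Int), p.getLast?) := by
  induction p using List.reverseRecOn with
  | nil => rfl
  | append_singleton p c ih =>
      rw [List.foldl_append, List.foldl_cons, List.foldl_nil, ih]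
      have hasc : (if (match p.getLast? with | some a => pvStepUp a c | none => false)
          then ((pvRun pvStepUp p : Int) + 1) else if pvAlnum c then 1 else 0) =
          (pvRun pvStepUp (p ++ [c]) : Int) := by
        rw [pvRun_concat]
        exact pvCastIte _ _ c
      have hdesc : (if (match p.getLast? with | some a => pvStepUp c a | none => false)
          then ((pvRun pvStepDown p : Int) + 1) else if pvAlnum c then 1 else 0) =
          (pvRun pvStepDown (p ++ [c]) : Int) := by
        rw [pvRun_concat]
        have hmatch : (match p.getLast? with | some a => pvStepUp c a | none => false) =
            (match p.getLast? with | some a => pvStepDown a c | none => false) := by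
          rcases p.getLast? with _ | a <;> rfl
        rw [hmatch]
        exact pvCastIte _ _ c
      show (_, _, _, _) = _
      rw [pvCnt_concat]
      refine Prod.ext ?_ (Prod.ext ?_ (Prod.ext ?_ ?_)) <;> simp only []
      · rw [hasc, hdesc]
        split <;> push_cast <;> ring
      · exact hasc
      · exact hdesc
      · rw [List.getLast?_concat]

def pvSeqList (lo : Nat) : Nat → List Char
  | 0 => []
  | n+1 => Char.ofNat lo :: pvSeqList (lo+1) n

def pvUp (a b : Char) : Prop := b.toNat = a.toNat + 1

lemma pvSeqList_drop (n : Nat) : ∀ (j lo : Nat),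
    (pvSeqList lo n).drop j = pvSeqList (lo + j) (n - j) := by
  induction n with
  | zero => intro j lo; simp [pvSeqList]
  | succ n ih =>
      intro j lo
      cases j with
      | zero => simp [pvSeqList]
      | succ j =>
          rw [pvSeqList, List.drop_succ_cons, ih j (lo+1)]
          congr 1 <;> omega

lemma pvSeqList_prefix (t : List Char) : ∀ (lo n : Nat),
    t <+: pvSeqList lo n ↔ t.length ≤ n ∧ t = pvSeqList lo t.length := by
  induction t with
  | nil => intro lo n; simp [pvSeqList]
  | cons c t ih =>
      intro lo n
      cases n with
      | zero =>
          simp only [pvSeqList, List.length_cons]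
          constructor
          · intro h; exact absurd (List.IsPrefix.length_le h) (by simp)
          · rintro ⟨h, -⟩; omega
      | succ n =>
          rw [pvSeqList, List.cons_prefix_cons, ih (lo+1) n]
          simp only [List.length_cons, pvSeqList]
          constructor
          · rintro ⟨rfl, h1, h2⟩
            exact ⟨by omega, by rw [← h2]⟩
          · rintro ⟨h1, h2⟩
            injection h2 with h2a h2b
            exact ⟨h2a, by omega, h2b⟩

lemma pvCharOfNat_toNat : ∀ m : Nat, m < 128 → (Char.ofNat m).toNat = m := by decide

lemma pvSeqList_props (k : Nat) : ∀ (m : Nat), m + k ≤ 128 →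
    (pvSeqList m k).IsChain pvUp ∧ ∀ c ∈ pvSeqList m k, m ≤ c.toNat ∧ c.toNat < m + k := by
  induction k with
  | zero => intro m h; simp [pvSeqList]
  | succ k ih =>
      intro m h
      obtain ⟨ihc, ihm⟩ := ih (m+1) (by omega)
      have hm : (Char.ofNat m).toNat = m := pvCharOfNat_toNat m (by omega)
      constructor
      · rw [pvSeqList]
        rcases hk : pvSeqList (m+1) k with _ | ⟨b, rest⟩
        · simp
        · rw [List.isChain_cons_cons]
          refine ⟨?_, by rw [← hk]; exact ihc⟩
          have hb : b ∈ pvSeqList (m+1) k := by rw [hk]; exact List.mem_cons_self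
          have := ihm b hb
          -- b is the head: b.toNat = m+1 in fact; from pvSeqList def
          have : b = Char.ofNat (m+1) := by
            cases k with
            | zero => simp [pvSeqList] at hk
            | succ k => rw [pvSeqList] at hk; injection hk with h1 _; exact h1.symm
          subst this
          show (Char.ofNat (m+1)).toNat = (Char.ofNat m).toNat + 1
          rw [hm, pvCharOfNat_toNat (m+1) (by omega)]
      · intro c hc
        rw [pvSeqList] at hc
        rcases List.mem_cons.mp hc with rfl | hc
        · omega
        · have := ihm c hc; omega

lemma pvChain_eq_seq (t : List Char) : ∀ (m : Nat),
    t.IsChain pvUp → (∀ c ∈ t, c.toNat < 128) →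
    (∀ (h : t ≠ []), (t.head h).toNat = m) →
    t = pvSeqList m t.length := by
  induction t with
  | nil => intro m _ _ _; rfl
  | cons a t ih =>
      intro m hchain hlt hhead
      have ha : a.toNat = m := hhead (by simp)
      have ham : a = Char.ofNat m := by rw [← ha, Char.ofNat_toNat]
      rw [List.length_cons, pvSeqList, ← ham]
      congr 1
      rcases t with _ | ⟨b, t'⟩
      · rfl
      · have hup : pvUp a b := (List.isChain_cons_cons.mp hchain).1
        exact ih (m+1) (List.isChain_cons_cons.mp hchain).2
          (fun c hc => hlt c (List.mem_cons_of_mem a hc))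
          (fun _ => by show b.toNat = m + 1; rw [← ha]; exact hup)

lemma pvChain_last (t : List Char) : ∀ (h : t ≠ []),
    t.IsChain pvUp → (t.getLast h).toNat = (t.head h).toNat + t.length - 1 := by
  induction t with
  | nil => intro h; exact absurd rfl h
  | cons a t ih =>
      intro h hchain
      rcases t with _ | ⟨b, t'⟩
      · simp
      · have hup : pvUp a b := (List.isChain_cons_cons.mp hchain).1
        have h2 := ih (List.cons_ne_nil b t') (List.isChain_cons_cons.mp hchain).2
        rw [List.getLast_cons (List.cons_ne_nil b t'), h2]
        simp only [List.head_cons, List.length_cons]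
        unfold pvUp at hup
        omega

lemma pvIsIn_seq_iff (t : List Char) (lo n : Nat) (hn : lo + n ≤ 128) (ht : t ≠ []) :
    PySem.Chars.isIn t (pvSeqList lo n) = true ↔
      t.IsChain pvUp ∧ ∀ c ∈ t, lo ≤ c.toNat ∧ c.toNat < lo + n := by
  rw [← PySem.Chars.exists_prefix_drop_iff_isIn]
  constructor
  · rintro ⟨j, hpre⟩
    rw [pvSeqList_drop, pvSeqList_prefix] at hpre
    obtain ⟨hlen, heq⟩ := hpre
    have hj : j ≤ n := by
      by_contra hj
      have : t.length = 0 := by omega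
      exact ht (List.eq_nil_of_length_eq_zero this)
    have hprops := pvSeqList_props t.length (lo + j) (by omega)
    rw [← heq] at hprops
    exact ⟨hprops.1, fun c hc => by have := hprops.2 c hc; omega⟩
  · rintro ⟨hchain, hrange⟩
    have hlt : ∀ c ∈ t, c.toNat < 128 := fun c hc => by have := hrange c hc; omega
    set m := (t.head ht).toNat with hm
    have hlo : lo ≤ m := (hrange _ (List.head_mem ht)).1
    have heq : t = pvSeqList m t.length :=
      pvChain_eq_seq t m hchain hlt (fun h => rfl)
    have hlast := pvChain_last t ht hchain
    have hlastmem := hrange _ (List.getLast_mem ht)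
    have hlen : (m - lo) + t.length ≤ n := by
      have h1 : 1 ≤ t.length := List.length_pos_iff.mpr ht
      omega
    refine ⟨m - lo, ?_⟩
    rw [pvSeqList_drop, pvSeqList_prefix]
    have : lo + (m - lo) = m := by omega
    rw [this]
    exact ⟨by omega, heq⟩
lemma pvAlnum_iff (c : Char) : pvAlnum c = true ↔
    (97 ≤ c.toNat ∧ c.toNat ≤ 122) ∨ (48 ≤ c.toNat ∧ c.toNat ≤ 57) := by
  unfold pvAlnum
  simp only [Bool.or_eq_true, Bool.and_eq_true, decide_eq_true_eq, Char.le_def,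
    UInt32.le_iff_toNat_le]
  rfl

lemma pvStepUp_iff (a b : Char) : pvStepUp a b = true ↔
    pvAlnum a = true ∧ pvAlnum b = true ∧ pvUp a b := by
  unfold pvStepUp pvUp
  simp [Bool.and_eq_true, and_assoc]

lemma pvChain_weaken (t : List Char) (h : t.IsChain (fun a b => pvStepUp a b = true)) :
    t.IsChain pvUp :=
  h.imp (fun _ _ hab => (pvStepUp_iff _ _ |>.mp hab).2.2)

lemma pvChain_strengthen (t : List Char) (hc : t.IsChain pvUp)
    (ha : ∀ c ∈ t, pvAlnum c = true) : t.IsChain (fun a b => pvStepUp a b = true) := by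
  induction t with
  | nil => simp
  | cons a t ih =>
      rcases t with _ | ⟨b, t'⟩
      · simp
      · rw [List.isChain_cons_cons] at hc ⊢
        refine ⟨?_, ih hc.2 (fun c hcm => ha c (List.mem_cons_of_mem a hcm))⟩
        rw [pvStepUp_iff]
        exact ⟨ha a (by simp), ha b (by simp), hc.1⟩

lemma pvClasses_of_chain (t : List Char) (hc : t.IsChain pvUp)
    (ha : ∀ c ∈ t, pvAlnum c = true) (ht : t ≠ []) :
    (∀ c ∈ t, 97 ≤ c.toNat ∧ c.toNat ≤ 122) ∨ (∀ c ∈ t, 48 ≤ c.toNat ∧ c.toNat ≤ 57) := by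
  induction t with
  | nil => exact absurd rfl ht
  | cons a t ih =>
      rcases t with _ | ⟨b, t'⟩
      · rcases (pvAlnum_iff a).mp (ha a (by simp)) with h | h
        · left; intro c hc'; rw [List.mem_singleton] at hc'; subst hc'; exact h
        · right; intro c hc'; rw [List.mem_singleton] at hc'; subst hc'; exact h
      · rw [List.isChain_cons_cons] at hc
        have hup : pvUp a b := hc.1
        have haa := (pvAlnum_iff a).mp (ha a (by simp))
        have hab := (pvAlnum_iff b).mp (ha b (by simp))
        rcases ih hc.2 (fun c hcm => ha c (List.mem_cons_of_mem a hcm)) (by simp) with h | h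
        · left
          intro c hcm
          rcases List.mem_cons.mp hcm with rfl | hcm
          · have hb := h b (by simp)
            unfold pvUp at hup
            omega
          · exact h c hcm
        · right
          intro c hcm
          rcases List.mem_cons.mp hcm with rfl | hcm
          · have hb := h b (by simp)
            unfold pvUp at hup
            omega
          · exact h c hcm

lemma pvG_up_iff (t : List Char) (ht : t ≠ []) :
    pvG pvStepUp t ↔
      (t.IsChain pvUp ∧ ∀ c ∈ t, 97 ≤ c.toNat ∧ c.toNat ≤ 122) ∨
      (t.IsChain pvUp ∧ ∀ c ∈ t, 48 ≤ c.toNat ∧ c.toNat ≤ 57) := by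
  constructor
  · rintro ⟨hc, ha⟩
    have hc' := pvChain_weaken t hc
    rcases pvClasses_of_chain t hc' ha ht with h | h
    · exact Or.inl ⟨hc', h⟩
    · exact Or.inr ⟨hc', h⟩
  · rintro (⟨hc, h⟩ | ⟨hc, h⟩) <;>
      exact ⟨pvChain_strengthen t hc
        (fun c hcm => (pvAlnum_iff c).mpr (by first | exact Or.inl (h c hcm) | exact Or.inr (h c hcm))),
        fun c hcm => (pvAlnum_iff c).mpr (by first | exact Or.inl (h c hcm) | exact Or.inr (h c hcm))⟩

lemma pvG_down_eq_rev (t : List Char) : pvG pvStepDown t ↔ pvG pvStepUp t.reverse := by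
  unfold pvG
  rw [List.isChain_reverse]
  simp only [List.mem_reverse]
  constructor
  · rintro ⟨hc, ha⟩; exact ⟨hc.imp (fun a b h => h), ha⟩
  · rintro ⟨hc, ha⟩; exact ⟨hc.imp (fun a b h => h), ha⟩

def pvWinOK (t : List Char) : Bool :=
  PySem.Chars.isIn t "abcdefghijklmnopqrstuvwxyz".toList
    || PySem.Chars.isIn t.reverse "abcdefghijklmnopqrstuvwxyz".toList
    || PySem.Chars.isIn t "0123456789".toList
    || PySem.Chars.isIn t.reverse "0123456789".toList

lemma pvWinOK_iff (t : List Char) (ht : t ≠ []) :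
    pvWinOK t = true ↔ pvG pvStepUp t ∨ pvG pvStepDown t := by
  have htr : t.reverse ≠ [] := by simpa using ht
  have halpha : "abcdefghijklmnopqrstuvwxyz".toList = pvSeqList 97 26 := by decide
  have hdig : "0123456789".toList = pvSeqList 48 10 := by decide
  unfold pvWinOK
  rw [halpha, hdig]
  simp only [Bool.or_eq_true]
  rw [pvIsIn_seq_iff t 97 26 (by omega) ht, pvIsIn_seq_iff t.reverse 97 26 (by omega) htr,
    pvIsIn_seq_iff t 48 10 (by omega) ht, pvIsIn_seq_iff t.reverse 48 10 (by omega) htr]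
  rw [pvG_down_eq_rev, pvG_up_iff t ht, pvG_up_iff t.reverse htr]
  have c1 : ∀ s : List Char, (∀ c ∈ s, 97 ≤ c.toNat ∧ c.toNat < 97 + 26) ↔
      (∀ c ∈ s, 97 ≤ c.toNat ∧ c.toNat ≤ 122) := by
    intro s; constructor <;> (intro hh c hc; have := hh c hc; omega)
  have c2 : ∀ s : List Char, (∀ c ∈ s, 48 ≤ c.toNat ∧ c.toNat < 48 + 10) ↔
      (∀ c ∈ s, 48 ≤ c.toNat ∧ c.toNat ≤ 57) := by
    intro s; constructor <;> (intro hh c hc; have := hh c hc; omega)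
  rw [c1 t, c1 t.reverse, c2 t, c2 t.reverse]
  tauto

-- ---- assembling the counts ----
lemma pvAlt_eq_cnt (pwd : String) (L : Int) :
    sequential_chars_penalty_alt pwd L = (pvCnt L (PySem.Chars.lower pwd.toList) : Int) := by
  unfold sequential_chars_penalty_alt
  rw [pvFoldB]

lemma pvHstpUp : ∀ a b, pvStepUp a b = true → pvAlnum a = true ∧ pvAlnum b = true := by
  intro a b h
  have := (pvStepUp_iff a b).mp h
  exact ⟨this.1, this.2.1⟩

lemma pvHstpDown : ∀ a b, pvStepDown a b = true → pvAlnum a = true ∧ pvAlnum b = true := by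
  intro a b h
  unfold pvStepDown at h
  have := (pvStepUp_iff b a).mp h
  exact ⟨this.2.1, this.1⟩

lemma pvQ_false (L : Int) (hL : 1 ≤ L) (s : List Char) (j : Nat) (hj : j + 1 < L.toNat ∨ s.length < L.toNat) :
    (decide (L ≤ (pvRun pvStepUp (s.take (j+1)) : Int) ∨ L ≤ (pvRun pvStepDown (s.take (j+1)) : Int))) = false := by
  rw [decide_eq_false_iff_not]
  have hu := pvRun_le pvStepUp (s.take (j+1))
  have hd := pvRun_le pvStepDown (s.take (j+1))
  rw [List.length_take] at hu hd
  rintro (h | h) <;> omega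

lemma pvQ_true_iff (L : Int) (hL : 1 ≤ L) (s : List Char) (i : Nat)
    (hi : i + L.toNat ≤ s.length) :
    (decide (L ≤ (pvRun pvStepUp (s.take (L.toNat - 1 + i + 1)) : Int) ∨
      L ≤ (pvRun pvStepDown (s.take (L.toNat - 1 + i + 1)) : Int))) =
    pvWinOK ((s.drop i).take L.toNat) := by
  have hL1 : 1 ≤ L.toNat := by omega
  set Lt := L.toNat with hLt
  have hj1 : L.toNat - 1 + i + 1 = i + Lt := by omega
  rw [hj1]
  have hplen : (s.take (i + Lt)).length = i + Lt := by
    rw [List.length_take]; omega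
  have hwin : (s.take (i + Lt)).drop ((s.take (i + Lt)).length - Lt) = (s.drop i).take Lt := by
    rw [hplen]
    have h2 : i + Lt - Lt = i := by omega
    rw [h2, List.drop_take]
    congr 1
    omega
  have hwne : (s.drop i).take Lt ≠ [] := by
    have : ((s.drop i).take Lt).length = Lt := by
      rw [List.length_take, List.length_drop]; omega
    intro hnil
    rw [hnil] at this
    simp at this
    omega
  have hup := pvRun_ge_iff pvStepUp pvHstpUp (s.take (i + Lt)) Lt (by omega)
  have hdown := pvRun_ge_iff pvStepDown pvHstpDown (s.take (i + Lt)) Lt (by omega)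
  rw [hwin, hplen] at hup hdown
  rw [Bool.eq_iff_iff, decide_eq_true_eq, pvWinOK_iff _ hwne]
  have hcast : ∀ r : Nat, L ≤ (r : Int) ↔ Lt ≤ r := by intro r; omega
  rw [hcast, hcast, hup, hdown]
  constructor
  · rintro (⟨-, h⟩ | ⟨-, h⟩) <;> [left; right] <;> exact h
  · rintro (h | h) <;> [left; right] <;> exact ⟨by omega, h⟩

lemma pvCnt_eq_countP (L : Int) (hL : 1 ≤ L) (s : List Char) :
    pvCnt L s = (List.range (s.length + 1 - L.toNat)).countP
        (fun i => pvWinOK ((s.drop i).take L.toNat)) := by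
  have hL1 : 1 ≤ L.toNat := by omega
  unfold pvCnt
  by_cases hcase : L.toNat ≤ s.length
  · have hsplit : List.range s.length = List.range (L.toNat - 1) ++
        (List.range (s.length + 1 - L.toNat)).map (fun x => L.toNat - 1 + x) := by
      rw [← List.range_add]
      congr 1
      omega
    rw [hsplit, List.countP_append]
    have h1 : (List.range (L.toNat - 1)).countP (fun j =>
        decide (L ≤ (pvRun pvStepUp (s.take (j+1)) : Int) ∨ L ≤ (pvRun pvStepDown (s.take (j+1)) : Int))) = 0 := by
      rw [List.countP_eq_zero]
      intro j hjm
      rw [List.mem_range] at hjm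
      rw [Bool.not_eq_true]
      exact pvQ_false L hL s j (by omega)
    rw [h1, Nat.zero_add, List.countP_map]
    apply List.countP_congr
    intro i him
    rw [List.mem_range] at him
    rw [Function.comp_apply, pvQ_true_iff L hL s i (by omega)]
  · have hm : s.length + 1 - L.toNat = 0 := by omega
    rw [hm]
    simp only [List.range_zero, List.countP_nil]
    rw [List.countP_eq_zero]
    intro j hjm
    rw [List.mem_range] at hjm
    rw [Bool.not_eq_true]
    exact pvQ_false L hL s j (by omega)

lemma pvCond_eq (s : List Char) (L : Int) (hL : 1 ≤ L) (k : Nat) :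
    (PySem.Chars.isIn (PySem.List.slice s (some (k : Int)) (some ((k : Int) + L))) "abcdefghijklmnopqrstuvwxyz".toList
      || PySem.Chars.isIn ((PySem.List.slice? (PySem.List.slice s (some (k : Int)) (some ((k : Int) + L))) none none (-1)).getD []) "abcdefghijklmnopqrstuvwxyz".toList
      || PySem.Chars.isIn (PySem.List.slice s (some (k : Int)) (some ((k : Int) + L))) "0123456789".toList
      || PySem.Chars.isIn ((PySem.List.slice? (PySem.List.slice s (some (k : Int)) (some ((k : Int) + L))) none none (-1)).getD []) "0123456789".toList)
    = pvWinOK ((s.drop k).take L.toNat) := by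
  have hcast : ((k : Int) + L) = ((k : Int) + ((L.toNat : Nat) : Int)) := by omega
  rw [hcast, PySem.List.slice_natCast_add, PySem.List.slice?_none_none_neg_one, Option.getD_some]
  rfl

lemma pvA_eq_countP (pwd : String) (L : Int) (hL : 1 ≤ L) :
    sequential_chars_penalty pwd L =
      (((List.range ((PySem.Chars.lower pwd.toList).length + 1 - L.toNat)).countP
        (fun i => pvWinOK (((PySem.Chars.lower pwd.toList).drop i).take L.toNat)) : Nat) : Int) := by
  unfold sequential_chars_penalty
  set s : List Char := PySem.Chars.lower pwd.toList with hs
  simp only [PySem.Chars.len_eq]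
  have hrange : PySem.List.pyRange 0 ((s.length : Int) - L + 1) 1 =
      (List.range (s.length + 1 - L.toNat)).map (fun k : Nat => (k : Int)) := by
    by_cases h : L ≤ (s.length : Int)
    · have heq : ((s.length : Int) - L + 1) = (((s.length + 1 - L.toNat : Nat)) : Int) := by
        omega
      rw [heq, PySem.List.pyRange_zero_natCast]
    · have h0 : s.length + 1 - L.toNat = 0 := by omega
      rw [h0]
      simp [PySem.List.pyRange]
      omega
  rw [hrange, PySem.List.foldl_count_if (fun i : Int =>
    (PySem.Chars.isIn (PySem.List.slice s (some i) (some (i + L))) "abcdefghijklmnopqrstuvwxyz".toList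
      || PySem.Chars.isIn ((PySem.List.slice? (PySem.List.slice s (some i) (some (i + L))) none none (-1)).getD []) "abcdefghijklmnopqrstuvwxyz".toList
      || PySem.Chars.isIn (PySem.List.slice s (some i) (some (i + L))) "0123456789".toList
      || PySem.Chars.isIn ((PySem.List.slice? (PySem.List.slice s (some i) (some (i + L))) none none (-1)).getD []) "0123456789".toList))]
  rw [Int.zero_add, List.countP_map]
  congr 1
  apply List.countP_congr
  intro k _
  rw [Function.comp_apply, pvCond_eq s L hL k]

-- ===== VERDICT (by name: the statement is the Claim_ definition above) =====
theorem sequential_chars_penalty_spec : Claim_equal_sequential_chars_penalty := by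
  intro pwd seq_len _hdom hpre
  unfold Spec_sequential_chars_penalty
  rw [pvAlt_eq_cnt, pvA_eq_countP pwd seq_len hpre, pvCnt_eq_countP seq_len hpre]
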